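-- pv_equiv track=rewrite | github.com/srikirancse/EPIJudge | epi_judge_python_solutions/microsoft_oa_questions.py | maximum_sum_of_same_digit_sum
-- ===== SOURCE A (Python) =====
-- import functools
-- import heapq
--
-- def maximum_sum_of_same_digit_sum(A):
--     digit_sum_map = {}
--     for num in A:
--         # Computing the sum of digits of the number
--         sum_of_digits = functools.reduce(
--             lambda x, y: int(x) + int(y), str(num))
--         # Updating the obtained sum to the hash map and also pushing the corresponding number to the min heap
--         if sum_of_digits not in digit_sum_map or len(digit_sum_map[sum_of_digits]) < 2:
--             # Push the numbers to the heap until the numbers which form a sum are exactly 2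
--             heapq.heappush(digit_sum_map.setdefault(
--                 sum_of_digits, []), num)
--
--         else:
--             # Once the numbers reach 2 pus and pop the numbers to maintain the count to 2
--             heapq.heappushpop(digit_sum_map[sum_of_digits], num)
--
--     # Return the maximum sum of all the the 2 largest numbers that forms a particular sum
--     return max(map(lambda nums: functools.reduce(lambda x, y: x + y, nums) if len(nums) == 2 else -1, digit_sum_map.values()))
-- ===== SOURCE B (Python) =====
-- import functools
-- from collections import defaultdict
--
--
-- def maximum_sum_of_same_digit_sum(A):
--     # Group every number by its digit-sum key (the same reduce over str(num)
--     # as the original: a single-digit number keys on the character itself).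
--     groups = defaultdict(list)
--     for num in A:
--         key = functools.reduce(lambda x, y: int(x) + int(y), str(num))
--         groups[key].append(num)
--     # For each group take the two largest numbers at the end (max, then max
--     # of the rest); groups with fewer than two numbers contribute -1.
--     best = []
--     for nums in groups.values():
--         if len(nums) >= 2:
--             m1 = max(nums)
--             rest = list(nums)
--             rest.remove(m1)
--             best.append(m1 + max(rest))
--         else:
--             best.append(-1)
--     return max(best)
-- ===== Notes on version B (the rewrite author's own statement) =====
-- stated objective: simpler
-- what changed: B replaces A's per-key size-2 min-heap maintained online (heappush/heappushpop with a length branch on every element) by plain grouping into lists in one pass, selecting each group's two largest (max, remove, max) only at the end; the digit-sum reduce, with its single-digit string-key quirk, is kept verbatim.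
import Mathlib
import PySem

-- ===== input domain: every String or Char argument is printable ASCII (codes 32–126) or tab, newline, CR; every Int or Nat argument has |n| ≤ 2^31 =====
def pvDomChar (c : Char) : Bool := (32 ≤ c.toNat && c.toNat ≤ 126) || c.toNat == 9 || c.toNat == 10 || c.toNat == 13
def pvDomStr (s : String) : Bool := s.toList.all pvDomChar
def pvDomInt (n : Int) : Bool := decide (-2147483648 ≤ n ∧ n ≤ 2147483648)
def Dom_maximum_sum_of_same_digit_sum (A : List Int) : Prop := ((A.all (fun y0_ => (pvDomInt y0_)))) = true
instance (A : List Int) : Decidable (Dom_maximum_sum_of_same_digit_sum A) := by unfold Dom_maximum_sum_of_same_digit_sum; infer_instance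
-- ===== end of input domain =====

-- B groups the numbers by digit-sum key in one pass and picks each group's two
-- largest at the end, instead of A's per-key size-2 min-heap maintained online
-- (objective: simpler selection, same one-dict pass).

-- ===== PORT A =====
-- Shared key helper: 'functools.reduce(lambda x, y: int(x) + int(y), str(num))'
-- appears verbatim in both Pythons.  With no initializer, reduce over a
-- ONE-character string returns that character itself (a str), so single-digit
-- numbers key on the character, never equal to any int key: we model the key
-- as (isStr?, value), a string key '<c>' being (true, code of c).
def pvDigitKey (num : Int) : Bool × Int :=
  match PySem.Int.toChars num with
  | [c] => (true, (c.toNat : Int))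
  | c :: rest =>
      (false, rest.foldl (fun acc ch => acc + ((PySem.Int.ofChars? [ch]).getD 0))
        ((PySem.Int.ofChars? [c]).getD 0))
      -- int('-') raises ValueError in Python (negative num): excluded by Pre_,
      -- the .getD 0 is never the result of an admitted input
  | [] => (false, 0)  -- unreachable: str(num) is never empty

-- heapq.heappush on a heap of size 0 or 1 (A only pushes when len < 2)
def pvHeappush (h : List Int) (x : Int) : List Int :=
  match h with
  | [] => [x]
  | [a] => if x < a then [x, a] else [a, x]
  | _ => h  -- unreachable in A

-- heapq.heappushpop on a heap of size 2 (the only size A calls it on)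
def pvHeappushpop (h : List Int) (x : Int) : List Int :=
  match h with
  | [a, b] => if x ≤ a then [a, b] else if x < b then [x, b] else [b, x]
  | _ => h  -- unreachable in A

def maximum_sum_of_same_digit_sum (A : List Int) : Int :=
  let m : PySem.Dict (Bool × Int) (List Int) :=
    A.foldl (fun d num =>
      let k := pvDigitKey num
      match d.get? k with
      | none => d.insert k (pvHeappush [] num)
      | some h =>
          if h.length < 2 then d.insert k (pvHeappush h num)
          else d.insert k (pvHeappushpop h num)) PySem.Dict.empty
  let vals := m.values.map (fun nums =>
      if nums.length == 2 then
        (match nums with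
         | x :: rest => rest.foldl (· + ·) x   -- functools.reduce(lambda x, y: x + y, nums)
         | [] => -1)                           -- unreachable: values are nonempty
      else -1)
  ((PySem.List.max? vals (fun y => y)).getD 0)  -- max() raises ValueError on A = []: excluded by Pre_

-- ===== PORT B =====
def maximum_sum_of_same_digit_sum_alt (A : List Int) : Int :=
  let groups : PySem.Dict (Bool × Int) (List Int) :=
    A.foldl (fun d num =>
      let k := pvDigitKey num
      d.insert k (d.getD k [] ++ [num])) PySem.Dict.empty   -- defaultdict(list) append
  let best := groups.values.foldl (fun acc nums =>
      if 2 ≤ nums.length then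
        match PySem.List.max? nums (fun y => y) with
        | some m1 =>
            let rest := (PySem.List.remove? nums m1).getD []
            acc ++ [m1 + ((PySem.List.max? rest (fun y => y)).getD 0)]
              -- rest has ≥ 1 element here, max() cannot raise; getD never read
        | none => acc ++ [-1]  -- unreachable: nums has ≥ 2 elements
      else acc ++ [-1]) []
  ((PySem.List.max? best (fun y => y)).getD 0)  -- max() raises ValueError on A = []: excluded by Pre_

-- ===== PRECONDITION & SPEC =====
-- Python A raises ValueError on the empty list (max of an empty sequence) and
-- on any negative number (int('-') inside the digit-sum reduce); B raises in
-- exactly the same situations.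
def Pre_maximum_sum_of_same_digit_sum (A : List Int) : Prop := A ≠ [] ∧ ∀ x ∈ A, 0 ≤ x
instance (A : List Int) : Decidable (Pre_maximum_sum_of_same_digit_sum A) := by unfold Pre_maximum_sum_of_same_digit_sum; infer_instance

def pvWitness_maximum_sum_of_same_digit_sum : List Int := [51, 42, 33, 60, 7]

def Spec_maximum_sum_of_same_digit_sum (A : List Int) (out : Int) : Prop := out = maximum_sum_of_same_digit_sum_alt A
instance (A : List Int) (out : Int) : Decidable (Spec_maximum_sum_of_same_digit_sum A out) := by unfold Spec_maximum_sum_of_same_digit_sum; infer_instance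

-- ===== CLAIM (what is proved, stated in full; the proofs are below) =====
def Claim_equal_maximum_sum_of_same_digit_sum : Prop := ∀ (A : List Int), Dom_maximum_sum_of_same_digit_sum A → Pre_maximum_sum_of_same_digit_sum A → Spec_maximum_sum_of_same_digit_sum A (maximum_sum_of_same_digit_sum A)

-- ===== LEMMAS AND PROOFS =====

-- abbreviations for the two fold bodies and the per-group summaries
def pvHeapStep (h : List Int) (x : Int) : List Int :=
  if h.length < 2 then pvHeappush h x else pvHeappushpop h x

def pvHeapFold (g : List Int) : List Int := g.foldl pvHeapStep []

def pvMax (g : List Int) : Int :=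
  match g with
  | x :: xs => xs.foldl max x
  | [] => 0

def pvMapVals (f : List Int → List Int) (d : PySem.Dict (Bool × Int) (List Int)) :
    PySem.Dict (Bool × Int) (List Int) :=
  PySem.Dict.mk (d.items.map (fun p => (p.1, f p.2)))

lemma pvMax_mem (g : List Int) (h : g ≠ []) : pvMax g ∈ g := by
  match g with
  | x :: xs =>
    rcases PySem.List.foldl_max_mem xs x with h1 | h1
    · simp [pvMax, h1]
    · simp [pvMax]; right; exact h1

lemma le_pvMax (g : List Int) : ∀ y ∈ g, y ≤ pvMax g := by
  match g with
  | [] => simp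
  | x :: xs =>
    intro y hy
    rcases List.mem_cons.mp hy with rfl | hy
    · exact (PySem.List.le_foldl_max xs y).1
    · exact (PySem.List.le_foldl_max xs x).2 y hy

lemma pvMax_eq (g : List Int) (hne : g ≠ []) (c : Int) (hc : c ∈ g)
    (hub : ∀ y ∈ g, y ≤ c) : pvMax g = c :=
  le_antisymm (hub _ (pvMax_mem g hne)) (le_pvMax g c hc)

lemma max?_id_eq_pvMax (g : List Int) (hne : g ≠ []) :
    PySem.List.max? g (fun y => y) = some (pvMax g) := by
  match g with
  | x :: xs => rw [PySem.List.max?_id_cons]; rfl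

-- the size-2 min-heap A maintains per key holds exactly the two largest
-- elements of the group, smaller first
lemma heapFold_append (g : List Int) (x : Int) :
    pvHeapFold (g ++ [x]) = pvHeapStep (pvHeapFold g) x := by
  simp [pvHeapFold, List.foldl_append]

lemma pvMax_append (ys : List Int) (x : Int) (h : ys ≠ []) :
    pvMax (ys ++ [x]) = max (pvMax ys) x := by
  match ys with
  | u :: t => simp [pvMax, List.foldl_append]

lemma heapFold_spec (g : List Int) (h2 : 2 ≤ g.length) :
    pvHeapFold g = [pvMax (g.erase (pvMax g)), pvMax g] := by
  induction g using List.reverseRecOn with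
  | nil => simp at h2
  | append_singleton ys x ih =>
    rw [heapFold_append]
    match ys, h2 with
    | [], h2 => simp at h2
    | [u], _ =>
      show pvHeappush [u] x = _
      have hm : pvMax ([u] ++ [x]) = max u x := pvMax_append [u] x (by simp)
      by_cases hxu : x < u
      · have hmu : pvMax ([u] ++ [x]) = u := by omega
        rw [hmu]
        have he : ([u] ++ [x]).erase u = [x] := by
          simp [List.erase_cons_head]
        rw [he]
        simp [pvHeappush, hxu, pvMax]
      · have hmu : pvMax ([u] ++ [x]) = x := by omega
        rw [hmu]
        by_cases hux : u = x
        · subst hux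
          have he : ([u] ++ [u]).erase u = [u] := by simp
          rw [he]
          simp [pvHeappush, pvMax]
        · have he : ([u] ++ [x]).erase x = [u] := by
            simp [hux]
          rw [he]
          simp [pvHeappush, pvMax, hxu]
    | u :: v :: t, _ =>
      set ys := u :: v :: t with hys
      have hys2 : 2 ≤ ys.length := by simp [hys]
      have hysne : ys ≠ [] := by simp [hys]
      rw [ih hys2]
      set b := pvMax ys with hb
      set a := pvMax (ys.erase b) with ha
      have hbmem : b ∈ ys := pvMax_mem ys hysne
      have herasene : ys.erase b ≠ [] := by
        have := List.length_erase_of_mem hbmem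
        intro hc
        rw [hc] at this
        simp at this
        omega
      have hamem : a ∈ ys.erase b := pvMax_mem _ herasene
      have hab : a ≤ b := le_pvMax ys a (List.mem_of_mem_erase hamem)
      have hLmax : pvMax (ys ++ [x]) = max b x := pvMax_append ys x hysne
      have hub : ∀ y ∈ ys, y ≤ b := le_pvMax ys
      show pvHeapStep [a, b] x = _
      have hstep : pvHeapStep [a, b] x
          = if x ≤ a then [a, b] else if x < b then [x, b] else [b, x] := rfl
      rw [hstep]
      by_cases hxa : x ≤ a
      · -- the new element is no larger than the smaller kept one: heap unchanged
        rw [if_pos hxa]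
        have hmb : pvMax (ys ++ [x]) = b := by omega
        rw [hmb]
        rw [List.erase_append_left _ hbmem,
            pvMax_append (ys.erase b) x herasene]
        have : max a x = a := by omega
        rw [this]
      · rw [if_neg hxa]
        by_cases hxb : x < b
        · -- x replaces the smaller kept element
          rw [if_pos hxb]
          have hmb : pvMax (ys ++ [x]) = b := by omega
          rw [hmb]
          rw [List.erase_append_left _ hbmem,
              pvMax_append (ys.erase b) x herasene]
          have : max a x = x := by omega
          rw [this]
        · -- x is the new maximum
          rw [if_neg hxb]
          have hmx : pvMax (ys ++ [x]) = x := by omega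
          rw [hmx]
          by_cases hbx : b = x
          · -- the old maximum equals x: erase removes the first of the two copies
            have hxmem : x ∈ ys := hbx ▸ hbmem
            have hmem' : x ∈ (ys ++ [x]).erase x := by
              have hc : ((ys ++ [x]).erase x).count x = (ys ++ [x]).count x - 1 := by
                simp [List.count_erase_self]
              have hc2 : 2 ≤ (ys ++ [x]).count x := by
                have h1 : 1 ≤ ys.count x := List.one_le_count_iff.mpr hxmem
                have h2' : ([x] : List Int).count x = 1 := by simp
                rw [List.count_append]
                omega
              have : 1 ≤ ((ys ++ [x]).erase x).count x := by omega
              exact List.one_le_count_iff.mp this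
            have hne' : (ys ++ [x]).erase x ≠ [] := by
              intro hc; rw [hc] at hmem'; simp at hmem'
            have := pvMax_eq ((ys ++ [x]).erase x) hne' x hmem' ?ub
            · rw [this, hbx]
            case ub =>
              intro y hy
              have hyL : y ∈ ys ++ [x] := List.mem_of_mem_erase hy
              rcases List.mem_append.mp hyL with hy' | hy'
              · have := hub y hy'; omega
              · simp at hy'; omega
          · -- x is strictly larger than everything in ys: erasing it gives ys back
            have hxnys : x ∉ ys := by
              intro hc
              have := hub x hc
              omega
            have he : (ys ++ [x]).erase x = ys := by
              rw [List.erase_append_right _ hxnys]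
              simp
            rw [he]

-- relating A's dict to B's dict
lemma get?_pvMapVals (f : List Int → List Int) (d : PySem.Dict (Bool × Int) (List Int))
    (k : Bool × Int) : (pvMapVals f d).get? k = (d.get? k).map f := by
  simp [pvMapVals, PySem.Dict.get?, List.find?_map, Function.comp_def]

lemma insert_pvMapVals (f : List Int → List Int) (d : PySem.Dict (Bool × Int) (List Int))
    (k : Bool × Int) (v : List Int) :
    pvMapVals f (d.insert k v) = (pvMapVals f d).insert k (f v) := by
  simp only [pvMapVals, PySem.Dict.insert, PySem.Dict.contains, List.any_map,
    Function.comp_def]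
  split
  · congr 1
    simp only [List.map_map, Function.comp_def]
    apply List.map_congr_left
    intro p _
    by_cases hp : (p.1 == k) = true <;> simp [hp]
  · simp

lemma values_pvMapVals (f : List Int → List Int) (d : PySem.Dict (Bool × Int) (List Int)) :
    (pvMapVals f d).values = d.values.map f := by
  simp [pvMapVals, PySem.Dict.values, List.map_map, Function.comp_def]

lemma mem_values_insert (d : PySem.Dict (Bool × Int) (List Int)) (k : Bool × Int)
    (v g : List Int) (hg : g ∈ (d.insert k v).values) : g = v ∨ g ∈ d.values := by
  simp only [PySem.Dict.insert] at hg
  split at hg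
  · simp only [PySem.Dict.values, List.mem_map] at hg
    rcases hg with ⟨p, hp, rfl⟩
    obtain ⟨a, ha, rfl⟩ := hp
    by_cases hak : (a.1 == k) = true
    · left
      rw [if_pos hak]
    · right
      rw [if_neg hak]
      exact List.mem_map.mpr ⟨a, ha, rfl⟩
  · simp only [PySem.Dict.values, List.map_append, List.mem_append] at hg
    rcases hg with hg | hg
    · right; exact hg
    · left; simpa using hg

-- B's grouping fold, named for the proofs
def pvGroupStep (d : PySem.Dict (Bool × Int) (List Int)) (num : Int) :
    PySem.Dict (Bool × Int) (List Int) :=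
  d.insert (pvDigitKey num) (d.getD (pvDigitKey num) [] ++ [num])

lemma dict_rel (A : List Int) : ∀ (dB : PySem.Dict (Bool × Int) (List Int)),
    A.foldl (fun d num =>
      let k := pvDigitKey num
      match d.get? k with
      | none => d.insert k (pvHeappush [] num)
      | some h =>
          if h.length < 2 then d.insert k (pvHeappush h num)
          else d.insert k (pvHeappushpop h num)) (pvMapVals pvHeapFold dB)
    = pvMapVals pvHeapFold (A.foldl pvGroupStep dB) := by
  induction A with
  | nil => intro dB; rfl
  | cons num t ih =>
    intro dB
    simp only [List.foldl_cons]
    have hstep :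
        (match (pvMapVals pvHeapFold dB).get? (pvDigitKey num) with
         | none => (pvMapVals pvHeapFold dB).insert (pvDigitKey num) (pvHeappush [] num)
         | some h =>
             if h.length < 2 then
               (pvMapVals pvHeapFold dB).insert (pvDigitKey num) (pvHeappush h num)
             else (pvMapVals pvHeapFold dB).insert (pvDigitKey num) (pvHeappushpop h num))
        = pvMapVals pvHeapFold (pvGroupStep dB num) := by
      cases hk : dB.get? (pvDigitKey num) with
      | none =>
        simp only [get?_pvMapVals, hk, Option.map_none]
        unfold pvGroupStep
        simp only [PySem.Dict.getD, hk, Option.getD_none, List.nil_append]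
        rw [insert_pvMapVals]
        rfl
      | some g =>
        simp only [get?_pvMapVals, hk, Option.map_some]
        unfold pvGroupStep
        simp only [PySem.Dict.getD, hk, Option.getD_some]
        rw [insert_pvMapVals, heapFold_append]
        unfold pvHeapStep
        split_ifs <;> rfl
    rw [hstep]
    exact ih (pvGroupStep dB num)

lemma values_nonempty (A : List Int) : ∀ (dB : PySem.Dict (Bool × Int) (List Int)),
    (∀ g ∈ dB.values, g ≠ []) → ∀ g ∈ (A.foldl pvGroupStep dB).values, g ≠ [] := by
  intro dB h
  induction A generalizing dB with
  | nil => exact h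
  | cons x xs ih =>
    intro g hg
    refine ih (pvGroupStep dB x) ?_ g hg
    intro g' hg'
    rcases mem_values_insert _ _ _ _ hg' with rfl | hg'
    · simp
    · exact h g' hg'

lemma per_group (g : List Int) (hne : g ≠ []) :
    (if (pvHeapFold g).length == 2 then
        (match pvHeapFold g with
         | x :: rest => rest.foldl (· + ·) x
         | [] => (-1 : Int))
      else -1)
    = (if 2 ≤ g.length then
        match PySem.List.max? g (fun y => y) with
        | some m1 =>
            m1 + ((PySem.List.max? ((PySem.List.remove? g m1).getD []) (fun y => y)).getD 0)
        | none => (-1 : Int)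
      else -1) := by
  match g, hne with
  | [u], _ =>
    simp [pvHeapFold, pvHeapStep, pvHeappush]
  | u :: v :: t, _ =>
    set g := u :: v :: t with hg
    have h2 : 2 ≤ g.length := by simp [hg]
    have hgne : g ≠ [] := by simp [hg]
    rw [heapFold_spec g h2]
    rw [if_pos h2, max?_id_eq_pvMax g hgne]
    have hbmem : pvMax g ∈ g := pvMax_mem g hgne
    have hred : (match some (pvMax g) with
        | some m1 => m1 + ((PySem.List.max? ((PySem.List.remove? g m1).getD []) (fun y => y)).getD 0)
        | none => (-1 : Int))
        = pvMax g + ((PySem.List.max? ((PySem.List.remove? g (pvMax g)).getD []) (fun y => y)).getD 0) := rfl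
    rw [hred, PySem.List.remove?_eq_some_erase g (pvMax g) hbmem]
    have herasene : g.erase (pvMax g) ≠ [] := by
      have := List.length_erase_of_mem hbmem
      intro hc
      rw [hc] at this
      simp at this
      omega
    simp only [Option.getD_some]
    rw [max?_id_eq_pvMax _ herasene]
    simp [Int.add_comm]

-- ===== VERDICT (by name: the statement is the Claim_ definition above) =====
theorem maximum_sum_of_same_digit_sum_spec : Claim_equal_maximum_sum_of_same_digit_sum := by
  intro A _ hpre
  unfold Spec_maximum_sum_of_same_digit_sum
  unfold maximum_sum_of_same_digit_sum maximum_sum_of_same_digit_sum_alt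
  have hdict := dict_rel A PySem.Dict.empty
  have hempty : pvMapVals pvHeapFold PySem.Dict.empty = PySem.Dict.empty := rfl
  rw [hempty] at hdict
  simp only []
  rw [show (A.foldl (fun d num =>
      let k := pvDigitKey num
      d.insert k (d.getD k [] ++ [num])) PySem.Dict.empty)
    = A.foldl pvGroupStep PySem.Dict.empty from rfl]
  rw [hdict, values_pvMapVals]
  -- turn B's append-fold into a map
  have hfold : ∀ (l : List (List Int)) (acc : List Int),
      l.foldl (fun acc nums =>
        if 2 ≤ nums.length then
          match PySem.List.max? nums (fun y => y) with
          | some m1 =>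
              let rest := (PySem.List.remove? nums m1).getD []
              acc ++ [m1 + ((PySem.List.max? rest (fun y => y)).getD 0)]
          | none => acc ++ [-1]
        else acc ++ [-1]) acc
      = acc ++ l.map (fun nums =>
          if 2 ≤ nums.length then
            match PySem.List.max? nums (fun y => y) with
            | some m1 =>
                m1 + ((PySem.List.max? ((PySem.List.remove? nums m1).getD []) (fun y => y)).getD 0)
            | none => (-1 : Int)
          else -1) := by
    intro l
    induction l with
    | nil => intro acc; simp
    | cons nums t ih =>
      intro acc
      simp only [List.foldl_cons, List.map_cons]
      rw [ih]
      by_cases h2 : 2 ≤ nums.length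
      · simp only [h2, if_true]
        cases PySem.List.max? nums (fun y => y) <;> simp
      · simp [h2]
  rw [hfold, List.nil_append, List.map_map]
  have hmaps := List.map_congr_left
    (l := (List.foldl pvGroupStep PySem.Dict.empty A).values)
    (fun g hg => per_group g
      (values_nonempty A PySem.Dict.empty (by simp [PySem.Dict.empty, PySem.Dict.values]) g hg))
  simp only [Function.comp_def]
  rw [hmaps]
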